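-- pv_equiv track=rewrite | github.com/the-headliner/100_days_DSA_challenge | Arrays/Move_negative_num_one_side.py | move_negatives_brute_force
-- ===== SOURCE A (Python) =====
-- def move_negatives_brute_force(arr):
--     """
--     Move all negative elements to one side of the array using extra space.
--
--     Parameters:
--     arr (list): Input array.
--
--     Returns:
--     list: The rearranged array.
--     """
--     negatives = []
--     non_negatives = []
--
--     # Separate negatives and non-negatives
--     for num in arr:
--         if num < 0:
--             negatives.append(num)
--         else:
--             non_negatives.append(num)
--
--     # Combine the two lists
--     result = negatives + non_negatives
--     return result
-- ===== SOURCE B (Python) =====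
-- def move_negatives_brute_force(arr):
--     """
--     Move all negative elements to the front, preserving relative order,
--     via one stable sort on a boolean key (returns a new list).
--     """
--     return sorted(arr, key=lambda x: not (x < 0))
-- ===== Notes on version B (the rewrite author's own statement) =====
-- stated objective: idiomatic
-- what changed: Replaced the explicit two-list partition loop and concatenation by a single stable sort on the boolean key 'not (x < 0)', which puts negatives first and preserves order within each group.
import Mathlib
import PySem

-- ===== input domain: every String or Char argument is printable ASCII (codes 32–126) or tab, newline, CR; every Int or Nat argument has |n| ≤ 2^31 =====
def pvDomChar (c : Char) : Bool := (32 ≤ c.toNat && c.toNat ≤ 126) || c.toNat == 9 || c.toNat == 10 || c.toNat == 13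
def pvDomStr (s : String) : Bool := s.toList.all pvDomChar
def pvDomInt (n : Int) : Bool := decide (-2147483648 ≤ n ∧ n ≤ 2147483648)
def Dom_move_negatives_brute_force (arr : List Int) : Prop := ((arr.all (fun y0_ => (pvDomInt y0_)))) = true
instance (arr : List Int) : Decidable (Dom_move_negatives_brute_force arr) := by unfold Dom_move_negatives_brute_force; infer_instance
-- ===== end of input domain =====

-- B replaces A's two-list partition loop by one stable sort on the boolean key not (x < 0); same return value, no mutation either way.


-- ===== PORT A =====
-- literal transliteration: one loop appending each element to 'negatives' or 'non_negatives', then the concatenation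
def move_negatives_brute_force (arr : List Int) : List Int :=
  let p := arr.foldl
    (fun (p : List Int × List Int) num =>
      if num < 0 then (p.1 ++ [num], p.2) else (p.1, p.2 ++ [num]))
    ([], [])
  p.1 ++ p.2

-- ===== PORT B =====
-- Source B: sorted(arr, key=lambda x: not (x < 0)) — PySem.List.sorted is Python's stable sort
def move_negatives_brute_force_alt (arr : List Int) : List Int :=
  PySem.List.sorted arr (fun x => !decide (x < 0)) false

-- ===== PRECONDITION & SPEC =====
def Spec_move_negatives_brute_force (arr : List Int) (out : List Int) : Prop := out = move_negatives_brute_force_alt arr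
instance (arr : List Int) (out : List Int) : Decidable (Spec_move_negatives_brute_force arr out) := by unfold Spec_move_negatives_brute_force; infer_instance

-- ===== CLAIM (what is proved, stated in full; the proofs are below) =====
def Claim_equal_move_negatives_brute_force : Prop := ∀ (arr : List Int), Dom_move_negatives_brute_force arr → Spec_move_negatives_brute_force arr (move_negatives_brute_force arr)

-- ===== LEMMAS AND PROOFS =====

-- A's partition fold, from arbitrary accumulators, is a pair of filters
theorem pvFoldA (xs : List Int) : ∀ (n nn : List Int),
    xs.foldl (fun (p : List Int × List Int) num =>
      if num < 0 then (p.1 ++ [num], p.2) else (p.1, p.2 ++ [num])) (n, nn)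
    = (n ++ xs.filter (fun x => decide (x < 0)), nn ++ xs.filter (fun x => !decide (x < 0))) := by
  induction xs with
  | nil => intro n nn; simp
  | cons x xs ih =>
    intro n nn
    by_cases hx : x < 0 <;> simp [List.foldl, hx, ih, List.filter]

-- inserting into a (all-negative ++ all-non-negative) list lands at the end of x's group
theorem pvInsertPart (x : Int) (negs nonnegs : List Int)
    (hn : ∀ a ∈ negs, a < 0) (hp : ∀ a ∈ nonnegs, ¬ a < 0) :
    PySem.List.insertBy
      (fun a b => decide ((!decide (a < 0)) < (!decide (b < 0)))) x (negs ++ nonnegs)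
    = if x < 0 then negs ++ x :: nonnegs else negs ++ nonnegs ++ [x] := by
  induction negs with
  | nil =>
    induction nonnegs with
    | nil => by_cases hx : x < 0 <;> simp [PySem.List.insertBy, hx]
    | cons y ys ihy =>
      have hy : ¬ y < 0 := hp y (List.mem_cons_self)
      have ih := ihy (fun a ha => hp a (List.mem_cons_of_mem _ ha))
      by_cases hx : x < 0
      · simp [PySem.List.insertBy, hx, hy]
      · simp only [List.nil_append, if_neg hx] at ih ⊢
        simp [PySem.List.insertBy, hx, hy, ih]
  | cons m ms ihm =>
    have hm : m < 0 := hn m (List.mem_cons_self)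
    have ih := ihm (fun a ha => hn a (List.mem_cons_of_mem _ ha))
    by_cases hx : x < 0 <;> simp [PySem.List.insertBy, hm, hx] <;> simp_all

-- the stable insertion-sort fold keeps the partition invariant
theorem pvFoldB (xs : List Int) : ∀ (negs nonnegs : List Int),
    (∀ a ∈ negs, a < 0) → (∀ a ∈ nonnegs, ¬ a < 0) →
    xs.foldl (fun acc x => PySem.List.insertBy
      (fun a b => decide ((!decide (a < 0)) < (!decide (b < 0)))) x acc) (negs ++ nonnegs)
    = (negs ++ xs.filter (fun x => decide (x < 0)))
      ++ (nonnegs ++ xs.filter (fun x => !decide (x < 0))) := by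
  induction xs with
  | nil => intro negs nonnegs _ _; simp
  | cons x xs ih =>
    intro negs nonnegs hn hp
    simp only [List.foldl, pvInsertPart x negs nonnegs hn hp]
    by_cases hx : x < 0
    · have : negs ++ x :: nonnegs = (negs ++ [x]) ++ nonnegs := by simp
      rw [if_pos hx, this,
        ih (negs ++ [x]) nonnegs
          (by intro a ha; rcases List.mem_append.1 ha with h | h
              · exact hn a h
              · simp at h; omega) hp]
      simp [List.filter, hx]
    · rw [if_neg hx, List.append_assoc,
        ih negs (nonnegs ++ [x]) hn
          (by intro a ha; rcases List.mem_append.1 ha with h | h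
              · exact hp a h
              · simp at h; omega)]
      simp [List.filter, hx]

-- ===== VERDICT (by name: the statement is the Claim_ definition above) =====
theorem move_negatives_brute_force_spec : Claim_equal_move_negatives_brute_force := by
  intro arr _
  show _ = _
  unfold move_negatives_brute_force move_negatives_brute_force_alt
  rw [PySem.List.sorted_eq_foldl_insertBy]
  have hB := pvFoldB arr [] [] (by simp) (by simp)
  simp only [List.nil_append] at hB
  simp [pvFoldA, hB]
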